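-- pv_equiv track=rewrite | github.com/ssmessia/AOC_2015 | 11.py | check_Three
-- ===== SOURCE A (Python) =====
-- def check_Three(p):
--     i, l = 0, []
--     while i < len(p)-1:
--         if p[i] == p[i+1]:
--             l.append(p[i])
--             i+=1
--         else:
--             i+=1
--     return(len(set(l)))
-- ===== SOURCE B (Python) =====
-- def check_Three(p):
--     # Run-length single pass: collapse p into maximal runs of equal chars,
--     # collect the char of every run of length >= 2.
--     doubled = set()
--     run_char, run_len = None, 0
--     for ch in p:
--         if ch == run_char:
--             run_len += 1
--         else:
--             if run_len >= 2:
--                 doubled.add(run_char)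
--             run_char, run_len = ch, 1
--     if run_len >= 2:
--         doubled.add(run_char)
--     return len(doubled)
-- ===== Notes on version B (the rewrite author's own statement) =====
-- stated objective: alternative
-- what changed: B replaces A's index-pair scan (building a list of chars at equal adjacent index pairs and deduplicating it at the end with set()) by a single run-length pass that collapses the string into maximal runs of equal characters and adds a run's character to the set when the run length is at least 2.
import Mathlib
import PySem

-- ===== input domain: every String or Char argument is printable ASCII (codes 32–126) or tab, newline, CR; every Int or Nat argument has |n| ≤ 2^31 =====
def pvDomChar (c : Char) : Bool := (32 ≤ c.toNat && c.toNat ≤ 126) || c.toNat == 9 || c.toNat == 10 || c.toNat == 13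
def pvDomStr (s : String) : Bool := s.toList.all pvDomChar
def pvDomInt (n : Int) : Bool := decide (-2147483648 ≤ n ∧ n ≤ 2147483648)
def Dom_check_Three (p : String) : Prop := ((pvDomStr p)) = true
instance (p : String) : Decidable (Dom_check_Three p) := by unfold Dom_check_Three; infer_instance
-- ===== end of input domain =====

-- B is an alternative one-pass run-length scan (runs of length ≥ 2) instead of A's
-- adjacent-index-pair scan; return values are proved equal on all inputs.

-- ===== PORT A =====
-- while i < len(p)-1: if p[i] == p[i+1]: l.append(p[i]);  i += 1 in both branches,
-- so the loop is a fold over range(0, len(p)-1); return len(set(l)).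
def check_Three (p : String) : Int :=
  ((PySem.Set.ofList
    ((PySem.List.pyRange 0 (PySem.Str.len p - 1) 1).foldl
      (fun acc i =>
        if PySem.List.pyGet? p.toList i = PySem.List.pyGet? p.toList (i + 1) then
          acc ++ (PySem.List.pyGet? p.toList i).toList
        else acc) [])).length : Int)

-- ===== PORT B =====
-- 'if run_len >= 2: doubled.add(run_char)'  (run_char is None only while run_len = 0)
def pvFlush (d : PySem.Set Char) (rc : Option Char) (rl : Int) : PySem.Set Char :=
  if 2 ≤ rl then
    match rc with
    | some c => PySem.Set.add d c
    | none => d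
  else d

-- one iteration of B's 'for ch in p' loop over state (doubled, run_char, run_len)
def pvStep (st : PySem.Set Char × Option Char × Int) (ch : Char) :
    PySem.Set Char × Option Char × Int :=
  if some ch = st.2.1 then (st.1, st.2.1, st.2.2 + 1)
  else (pvFlush st.1 st.2.1 st.2.2, some ch, 1)

def check_Three_alt (p : String) : Int :=
  ((pvFlush (p.toList.foldl pvStep (PySem.Set.empty, none, 0)).1
      (p.toList.foldl pvStep (PySem.Set.empty, none, 0)).2.1
      (p.toList.foldl pvStep (PySem.Set.empty, none, 0)).2.2).length : Int)

-- ===== PRECONDITION & SPEC =====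
def Spec_check_Three (p : String) (out : Int) : Prop := out = check_Three_alt p
instance (p : String) (out : Int) : Decidable (Spec_check_Three p out) := by unfold Spec_check_Three; infer_instance

-- ===== CLAIM (what is proved, stated in full; the proofs are below) =====
def Claim_equal_check_Three : Prop := ∀ (p : String), Dom_check_Three p → Spec_check_Three p (check_Three p)

-- ===== LEMMAS AND PROOFS =====

-- the chars of the equal adjacent pairs of a list, in order (A's list l, reference form)
def pairsOf : List Char → List Char
  | [] => []
  | [_] => []
  | a :: b :: t => (if a = b then [a] else []) ++ pairsOf (b :: t)

-- chars B still adds from state (rc, rl) over the remaining input, including the final flush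
def specF : Option Char → Int → List Char → Char → Prop
  | rc, rl, [], c => 2 ≤ rl ∧ rc = some c
  | rc, rl, x :: t, c =>
      if some x = rc then specF rc (rl + 1) t c
      else (2 ≤ rl ∧ rc = some c) ∨ specF (some x) 1 t c

lemma mem_pvFlush (d : PySem.Set Char) (rc : Option Char) (rl : Int) (c : Char) :
    c ∈ pvFlush d rc rl ↔ c ∈ d ∨ (2 ≤ rl ∧ rc = some c) := by
  unfold pvFlush
  split_ifs with h
  · cases rc with
    | none => simp [h]
    | some a => simp [PySem.Set.mem_add, h, eq_comm]
  · simp [h]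

lemma nodup_pvFlush (d : PySem.Set Char) (rc : Option Char) (rl : Int) (hd : d.Nodup) :
    (pvFlush d rc rl).Nodup := by
  unfold pvFlush
  split_ifs
  · cases rc with
    | none => exact hd
    | some a => exact PySem.Set.nodup_add d a hd
  · exact hd

lemma nodup_fold (xs : List Char) (d : PySem.Set Char) (rc : Option Char) (rl : Int)
    (hd : d.Nodup) : ((xs.foldl pvStep (d, rc, rl)).1).Nodup := by
  induction xs generalizing d rc rl with
  | nil => exact hd
  | cons x t ih =>
      simp only [List.foldl_cons, pvStep]
      split_ifs
      · exact ih d rc (rl + 1) hd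
      · exact ih _ (some x) 1 (nodup_pvFlush d rc rl hd)

lemma mem_final (xs : List Char) (d : PySem.Set Char) (rc : Option Char) (rl : Int) (c : Char) :
    (c ∈ pvFlush (xs.foldl pvStep (d, rc, rl)).1 (xs.foldl pvStep (d, rc, rl)).2.1
        (xs.foldl pvStep (d, rc, rl)).2.2)
      ↔ c ∈ d ∨ specF rc rl xs c := by
  induction xs generalizing d rc rl with
  | nil => simp [specF, mem_pvFlush]
  | cons x t ih =>
      simp only [List.foldl_cons, pvStep, specF]
      split_ifs with h
      · exact ih d rc (rl + 1)
      · rw [ih _ (some x) 1, mem_pvFlush]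
        tauto

lemma specF_some (t : List Char) (a : Char) (k : Int) (c : Char) (hk : 1 ≤ k) :
    specF (some a) k t c ↔ (2 ≤ k ∧ c = a) ∨ c ∈ pairsOf (a :: t) := by
  induction t generalizing a k with
  | nil => simp [specF, pairsOf, eq_comm]
  | cons b t' ih =>
      by_cases hba : b = a
      · subst hba
        simp only [specF, reduceIte]
        rw [ih b (k + 1) (by omega)]
        have hp : c ∈ pairsOf (b :: b :: t') ↔ c = b ∨ c ∈ pairsOf (b :: t') := by
          simp [pairsOf]
        rw [hp]
        have h2 : (2 : Int) ≤ k + 1 := by omega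
        simp only [h2, true_and]
        tauto
      · have hne : ¬ (some b = some a) := by simpa using hba
        simp only [specF, if_neg hne]
        rw [ih b 1 (by omega)]
        simp only [pairsOf, if_neg (by simpa [eq_comm] using hba : ¬ a = b), List.nil_append]
        constructor
        · rintro (⟨h2, h⟩ | ⟨h2, _⟩ | hm)
          · exact Or.inl ⟨h2, by simpa [eq_comm] using h⟩
          · omega
          · exact Or.inr hm
        · rintro (⟨h2, rfl⟩ | hm)
          · exact Or.inl ⟨h2, rfl⟩
          · exact Or.inr (Or.inr hm)

lemma specF_init (xs : List Char) (c : Char) : specF none 0 xs c ↔ c ∈ pairsOf xs := by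
  cases xs with
  | nil => simp [specF, pairsOf]
  | cons x t =>
      have hne : ¬ (some x = (none : Option Char)) := by simp
      simp only [specF, if_neg hne]
      rw [specF_some t x 1 c (by omega)]
      constructor
      · rintro (⟨h2, _⟩ | ⟨h2, _⟩ | h)
        · simp at h2
        · omega
        · exact h
      · intro h; exact Or.inr (Or.inr h)

-- B's value: the distinct-element count of pairsOf
lemma alt_eq (p : String) :
    check_Three_alt p = ((PySem.Set.ofList (pairsOf p.toList)).length : Int) := by
  unfold check_Three_alt
  have hmem : ∀ c, (c ∈ pvFlush (p.toList.foldl pvStep (PySem.Set.empty, none, 0)).1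
      (p.toList.foldl pvStep (PySem.Set.empty, none, 0)).2.1
      (p.toList.foldl pvStep (PySem.Set.empty, none, 0)).2.2)
      ↔ c ∈ PySem.Set.ofList (pairsOf p.toList) := by
    intro c
    rw [mem_final, specF_init, PySem.Set.mem_ofList]
    have : c ∉ (PySem.Set.empty : PySem.Set Char) := by simp [PySem.Set.empty]
    tauto
  have hnd : (pvFlush (p.toList.foldl pvStep (PySem.Set.empty, none, 0)).1
      (p.toList.foldl pvStep (PySem.Set.empty, none, 0)).2.1
      (p.toList.foldl pvStep (PySem.Set.empty, none, 0)).2.2).Nodup :=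
    nodup_pvFlush _ _ _ (nodup_fold _ _ _ _ (by simp [PySem.Set.empty]))
  have hperm := (List.perm_ext_iff_of_nodup hnd (PySem.Set.nodup_ofList _)).2 hmem
  exact_mod_cast hperm.length_eq

-- A's collected list is exactly pairsOf
lemma flatMap_pairs (cs : List Char) :
    (List.range (cs.length - 1)).flatMap
      (fun k => if cs[k]? = cs[k + 1]? then (cs[k]?).toList else []) = pairsOf cs := by
  induction cs using pairsOf.induct with
  | case1 => simp [pairsOf]
  | case2 a => simp [pairsOf]
  | case3 a b t ih =>
      have hlen : (a :: b :: t).length - 1 = ((b :: t).length - 1) + 1 := by simp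
      rw [hlen, List.range_succ_eq_map, List.flatMap_cons, List.flatMap_map]
      have hsh : List.flatMap
          (fun k : Nat => if (a :: b :: t)[k.succ]? = (a :: b :: t)[k.succ + 1]? then
              ((a :: b :: t)[k.succ]?).toList else [])
          (List.range ((b :: t).length - 1)) = pairsOf (b :: t) := by
        rw [← ih]
        exact List.flatMap_congr (fun k _ => by simp [Nat.succ_eq_add_one])
      rw [hsh]
      simp [pairsOf]

lemma a_eq (p : String) :
    check_Three p = ((PySem.Set.ofList (pairsOf p.toList)).length : Int) := by
  unfold check_Three
  have hstep : (fun (acc : List Char) (i : Int) =>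
      if PySem.List.pyGet? p.toList i = PySem.List.pyGet? p.toList (i + 1) then
        acc ++ (PySem.List.pyGet? p.toList i).toList
      else acc)
      = fun acc i => acc ++ (if PySem.List.pyGet? p.toList i = PySem.List.pyGet? p.toList (i + 1)
          then (PySem.List.pyGet? p.toList i).toList else []) := by
    funext acc i; split_ifs <;> simp
  rw [hstep, PySem.List.foldl_append_eq_flatMap, List.nil_append]
  rw [PySem.List.pyRange_one, List.flatMap_map]
  have hb : (PySem.Str.len p - 1 - 0).toNat = p.toList.length - 1 := by
    simp only [PySem.Str.len_eq]
    omega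
  rw [hb]
  have hg : List.flatMap
      (fun k : Nat => if PySem.List.pyGet? p.toList (0 + (k : Int)) = PySem.List.pyGet? p.toList (0 + (k : Int) + 1)
          then (PySem.List.pyGet? p.toList (0 + (k : Int))).toList else [])
      (List.range (p.toList.length - 1)) = pairsOf p.toList := by
    rw [← flatMap_pairs p.toList]
    refine List.flatMap_congr (fun k _ => ?_)
    have h2 : (0 : Int) + (k : Int) + 1 = ((k + 1 : Nat) : Int) := by push_cast; ring
    rw [h2]
    simp only [zero_add, PySem.List.pyGet?_natCast]
  rw [hg]

-- ===== VERDICT (by name: the statement is the Claim_ definition above) =====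
theorem check_Three_spec : Claim_equal_check_Three := by
  intro p _
  unfold Spec_check_Three
  rw [a_eq, alt_eq]
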